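-- pv_equiv track=rewrite | github.com/hamzakhansial99-sudo/assignment- | NQueensSAT/solutions.py | is_blocked_clause
-- ===== SOURCE A (Python) =====
-- def is_blocked_clause(clause, formula):
--     """
--     Check if a clause is blocked.
--     Clause is blocked if there is a literal l in it such that all resolvents with ¬l are tautologies.
--     """
--     for lit in clause:
--         tautology = True
--         for other in [c for c in formula if -lit in c]:
--             resolvent = list(set([l for l in clause if l != lit] + [l for l in other if l != -lit]))
--             if not any(-l in resolvent for l in resolvent):
--                 tautology = False
--                 break
--         if tautology:
--             return True, lit
--     return False, None
-- ===== SOURCE B (Python) =====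
-- def _other_taut(base, other, neg):
--     oset = {l for l in other if l != neg}
--     return any(-l in base or -l in oset for l in oset)
--
--
-- def is_blocked_clause(clause, formula):
--     # index each clause of the formula by the literals it contains (built once)
--     index = {}
--     for c in formula:
--         for l in set(c):
--             index.setdefault(l, []).append(c)
--     for lit in clause:
--         base = {l for l in clause if l != lit}
--         if any(-l in base for l in base):
--             return True, lit
--         if all(_other_taut(base, other, -lit) for other in index.get(-lit, [])):
--             return True, lit
--     return False, None
-- ===== Notes on version B (the rewrite author's own statement) =====
-- stated objective: alternative
-- what changed: B builds a literal-to-clauses index over the formula once instead of rescanning the whole formula for every literal of the clause, uses sets for the membership tests, and replaces the resolvent-list construction by a decomposed tautology test (the base-set tautology check is hoisted out of the inner loop, so only the other clause's literals are scanned per resolvent); the up-front index build trades constant-factor overhead on inputs where A's loop exits early.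
import Mathlib
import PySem

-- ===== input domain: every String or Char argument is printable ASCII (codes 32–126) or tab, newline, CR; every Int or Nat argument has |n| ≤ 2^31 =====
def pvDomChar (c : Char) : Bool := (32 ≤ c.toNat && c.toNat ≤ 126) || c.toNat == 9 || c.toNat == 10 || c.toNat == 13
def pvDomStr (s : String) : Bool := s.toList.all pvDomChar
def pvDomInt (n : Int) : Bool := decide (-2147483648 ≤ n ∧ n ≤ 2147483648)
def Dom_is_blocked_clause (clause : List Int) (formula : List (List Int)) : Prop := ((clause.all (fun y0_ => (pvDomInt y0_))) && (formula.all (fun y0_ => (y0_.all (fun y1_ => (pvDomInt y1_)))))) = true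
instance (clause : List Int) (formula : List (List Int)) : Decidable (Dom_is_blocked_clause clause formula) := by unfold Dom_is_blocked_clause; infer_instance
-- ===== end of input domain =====

-- B indexes the formula by literal once and tests tautology with sets (base-set check hoisted out of the inner loop); objective: alternative algorithm.


-- ===== PORT A =====
-- inner 'for other in [c for c in formula if -lit in c]' with break: false on first non-tautological resolvent
def aTaut (clause : List Int) (lit : Int) (others : List (List Int)) : Bool :=
  match others with
  | [] => true
  | other :: rest =>
      let resolvent := PySem.Set.ofList ((clause.filter (fun l => l != lit)) ++ (other.filter (fun l => l != -lit)))
      if resolvent.any (fun l => resolvent.contains (-l)) then aTaut clause lit rest else false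

-- outer 'for lit in clause' with early return
def aLoop (clause : List Int) (formula : List (List Int)) (lits : List Int) : Bool × Option Int :=
  match lits with
  | [] => (false, none)
  | lit :: rest =>
      if aTaut clause lit (formula.filter (fun c => c.contains (-lit))) then (true, some lit)
      else aLoop clause formula rest

def is_blocked_clause (clause : List Int) (formula : List (List Int)) : Bool × Option Int :=
  aLoop clause formula clause

-- ===== PORT B =====
-- index: for c in formula: for l in set(c): index.setdefault(l, []).append(c)
def bIndex (formula : List (List Int)) : PySem.Dict Int (List (List Int)) :=
  formula.foldl
    (fun d c => ((PySem.Set.ofList c).map (fun l => (l, c))).foldl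
      (fun d p => d.modify p.1 [] (fun v => v ++ [p.2])) d)
    PySem.Dict.empty

-- _other_taut(base, other, neg)
def bOtherTaut (base : PySem.Set Int) (other : List Int) (neg : Int) : Bool :=
  let oset := PySem.Set.ofList (other.filter (fun l => l != neg))
  oset.any (fun l => base.contains (-l) || oset.contains (-l))

def bLoop (idx : PySem.Dict Int (List (List Int))) (clause : List Int) (lits : List Int) :
    Bool × Option Int :=
  match lits with
  | [] => (false, none)
  | lit :: rest =>
      let base := PySem.Set.ofList (clause.filter (fun l => l != lit))
      if base.any (fun l => base.contains (-l)) then (true, some lit)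
      else if (idx.getD (-lit) []).all (fun other => bOtherTaut base other (-lit)) then (true, some lit)
      else bLoop idx clause rest

def is_blocked_clause_alt (clause : List Int) (formula : List (List Int)) : Bool × Option Int :=
  bLoop (bIndex formula) clause clause

-- ===== PRECONDITION & SPEC =====
def Spec_is_blocked_clause (clause : List Int) (formula : List (List Int)) (out : Bool × Option Int) : Prop := out = is_blocked_clause_alt clause formula
instance (clause : List Int) (formula : List (List Int)) (out : Bool × Option Int) : Decidable (Spec_is_blocked_clause clause formula out) := by unfold Spec_is_blocked_clause; infer_instance

-- ===== CLAIM (what is proved, stated in full; the proofs are below) =====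
def Claim_equal_is_blocked_clause : Prop := ∀ (clause : List Int) (formula : List (List Int)), Dom_is_blocked_clause clause formula → Spec_is_blocked_clause clause formula (is_blocked_clause clause formula)

-- ===== LEMMAS AND PROOFS =====

lemma filter_beq_of_nodup (s : List Int) (hs : s.Nodup) (k : Int) :
    s.filter (fun x => x == k) = if k ∈ s then [k] else [] := by
  rw [List.filter_beq]
  by_cases h : k ∈ s
  · simp [h, List.count_eq_one_of_mem hs h]
  · simp [h, List.count_eq_zero_of_not_mem h]

-- effect of indexing one clause on the lists stored under key k
lemma bIndex_step (c : List Int) (d : PySem.Dict Int (List (List Int))) (k : Int) :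
    (((PySem.Set.ofList c).map (fun l => (l, c))).foldl
        (fun d p => d.modify p.1 [] (fun v => v ++ [p.2])) d).getD k []
      = d.getD k [] ++ (if c.contains k then [c] else []) := by
  rw [PySem.Dict.getD_foldl_modify_append]
  congr 1
  rw [List.filter_map]
  have : ((fun p : Int × List Int => p.1 == k) ∘ fun l => (l, c)) = fun x => x == k := rfl
  rw [this, filter_beq_of_nodup _ (PySem.Set.nodup_ofList c) k]
  by_cases h : k ∈ c
  · simp [PySem.Set.mem_ofList, h]
  · simp [PySem.Set.mem_ofList, h]

lemma bIndex_aux (formula : List (List Int)) (d : PySem.Dict Int (List (List Int))) (k : Int) :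
    (formula.foldl
        (fun d c => ((PySem.Set.ofList c).map (fun l => (l, c))).foldl
          (fun d p => d.modify p.1 [] (fun v => v ++ [p.2])) d) d).getD k []
      = d.getD k [] ++ formula.filter (fun c => c.contains k) := by
  induction formula generalizing d with
  | nil => simp
  | cons c rest ih =>
      simp only [List.foldl_cons, List.filter_cons, ih, bIndex_step]
      by_cases h : k ∈ c <;> simp [h]

-- the index, looked up at k, holds exactly the clauses of the formula containing k, in order
lemma bIndex_getD (formula : List (List Int)) (k : Int) :
    (bIndex formula).getD k [] = formula.filter (fun c => c.contains k) := by
  simpa using bIndex_aux formula PySem.Dict.empty k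

-- A's resolvent-set tautology test equals B's decomposition (base part ∨ other part)
lemma taut_step (B O : List Int) :
    ((PySem.Set.ofList (B ++ O)).any (fun l => (PySem.Set.ofList (B ++ O)).contains (-l)))
    = ((PySem.Set.ofList B).any (fun l => (PySem.Set.ofList B).contains (-l))
       || (PySem.Set.ofList O).any (fun l =>
            (PySem.Set.ofList B).contains (-l) || (PySem.Set.ofList O).contains (-l))) := by
  rw [Bool.eq_iff_iff]
  simp only [List.any_eq_true, PySem.Set.contains_eq_listContains, List.contains_eq_mem,
    decide_eq_true_eq, PySem.Set.mem_ofList, List.mem_append, Bool.or_eq_true]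
  constructor
  · rintro ⟨l, hl | hl, h2 | h2⟩
    · exact Or.inl ⟨l, hl, h2⟩
    · exact Or.inr ⟨-l, h2, Or.inl (by simpa using hl)⟩
    · exact Or.inr ⟨l, hl, Or.inl h2⟩
    · exact Or.inr ⟨l, hl, Or.inr h2⟩
  · rintro (⟨l, hl, h2⟩ | ⟨l, hl, h2 | h2⟩)
    · exact ⟨l, Or.inl hl, Or.inl h2⟩
    · exact ⟨l, Or.inr hl, Or.inl h2⟩
    · exact ⟨l, Or.inr hl, Or.inr h2⟩

lemma aTaut_eq_all (clause : List Int) (lit : Int) (others : List (List Int)) :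
    aTaut clause lit others
      = others.all (fun other =>
          (PySem.Set.ofList ((clause.filter (fun l => l != lit)) ++ (other.filter (fun l => l != -lit)))).any
            (fun l => (PySem.Set.ofList ((clause.filter (fun l => l != lit)) ++ (other.filter (fun l => l != -lit)))).contains (-l))) := by
  induction others with
  | nil => rfl
  | cons o rest ih =>
      simp only [aTaut, List.all_cons]
      by_cases h : (PySem.Set.ofList ((clause.filter (fun l => l != lit)) ++ (o.filter (fun l => l != -lit)))).any
            (fun l => (PySem.Set.ofList ((clause.filter (fun l => l != lit)) ++ (o.filter (fun l => l != -lit)))).contains (-l)) = true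
      <;> simp [h, ih]

lemma loop_eq (clause : List Int) (formula : List (List Int)) (lits : List Int) :
    aLoop clause formula lits = bLoop (bIndex formula) clause lits := by
  induction lits with
  | nil => rfl
  | cons lit rest ih =>
      have hstep : aTaut clause lit (formula.filter (fun c => c.contains (-lit)))
          = ((PySem.Set.ofList (clause.filter (fun l => l != lit))).any
              (fun l => (PySem.Set.ofList (clause.filter (fun l => l != lit))).contains (-l))
            || ((bIndex formula).getD (-lit) []).all
                (fun other => bOtherTaut (PySem.Set.ofList (clause.filter (fun l => l != lit))) other (-lit))) := by
        rw [aTaut_eq_all, bIndex_getD]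
        by_cases hb : (PySem.Set.ofList (clause.filter (fun l => l != lit))).any
            (fun l => (PySem.Set.ofList (clause.filter (fun l => l != lit))).contains (-l)) = true
        · simp only [hb, Bool.true_or]
          rw [List.all_eq_true]
          intro other _
          rw [taut_step, hb, Bool.true_or]
        · simp only [hb, Bool.false_or]
          rw [Bool.eq_iff_iff, List.all_eq_true, List.all_eq_true]
          apply forall_congr'
          intro other
          apply imp_congr_right
          intro _
          rw [taut_step, Bool.eq_false_iff.mpr hb, Bool.false_or]
          exact Iff.rfl
      simp only [aLoop, bLoop, hstep, ih, PySem.Set.contains_eq_listContains]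
      split_ifs with h1 h2 h3 <;>
        first
          | rfl
          | (simp only [Bool.or_eq_true] at h1; tauto)

-- ===== VERDICT (by name: the statement is the Claim_ definition above) =====
theorem is_blocked_clause_spec : Claim_equal_is_blocked_clause := by
  intro clause formula _
  unfold Spec_is_blocked_clause is_blocked_clause is_blocked_clause_alt
  exact loop_eq clause formula clause
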